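-- pv_equiv track=rewrite | github.com/Prathamesh8766/DSA | array/maxConsicative1.py | maxConsicativeWith1
-- ===== SOURCE A (Python) =====
-- def maxConsicativeWith1(arr):
--     count,max=0,0
--
--     for i in arr:
--
--         if i ==0:
--             count=0
--         else:
--             count=count+1
--         if count>max:
--             max=count
--     return max
-- ===== SOURCE B (Python) =====
-- from itertools import groupby
--
-- def maxConsicativeWith1(arr):
--     # split into maximal runs keyed by "is zero"; answer = longest non-zero run
--     return max((sum(1 for _ in grp) for is_zero, grp in groupby(arr, key=lambda x: x == 0) if not is_zero), default=0)
-- ===== Notes on version B (the rewrite author's own statement) =====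
-- stated objective: idiomatic
-- what changed: Replaces the running-counter-plus-max scan with itertools.groupby: split the array into maximal zero/non-zero runs and take the maximum non-zero run length (default 0).
import Mathlib
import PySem

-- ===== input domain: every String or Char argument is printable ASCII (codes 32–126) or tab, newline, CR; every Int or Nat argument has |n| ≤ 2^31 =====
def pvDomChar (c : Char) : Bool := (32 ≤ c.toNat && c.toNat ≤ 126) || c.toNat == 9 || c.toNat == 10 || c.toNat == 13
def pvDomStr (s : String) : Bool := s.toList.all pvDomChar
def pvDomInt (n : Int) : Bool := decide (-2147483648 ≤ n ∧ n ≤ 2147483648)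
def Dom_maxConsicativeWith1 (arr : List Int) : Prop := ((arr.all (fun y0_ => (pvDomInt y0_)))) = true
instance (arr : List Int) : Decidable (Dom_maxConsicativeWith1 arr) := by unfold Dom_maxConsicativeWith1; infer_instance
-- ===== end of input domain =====

-- B replaces A's running-counter-plus-max scan by a groupby decomposition: split into
-- maximal non-zero runs, return the longest run's length (0 if none).

-- ===== PORT A =====
-- A: one pass with state (count, max); count resets on 0, max updated when exceeded.
def maxConsicativeWith1 (arr : List Int) : Int :=
  (arr.foldl (fun (s : Int × Int) i =>
      let count : Int := if i = 0 then 0 else s.1 + 1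
      let mx : Int := if count > s.2 then count else s.2
      (count, mx)) (0, 0)).2

-- ===== PORT B =====
-- groupby(arr, key = x == 0): lengths of the maximal non-zero runs, in order.
def nzRuns : List Int → List Int
  | [] => []
  | x :: xs =>
    if x = 0 then nzRuns xs
    else (1 + (xs.takeWhile (fun y => y ≠ 0)).length : Int) ::
         nzRuns (xs.dropWhile (fun y => y ≠ 0))
termination_by xs => xs.length
decreasing_by
  · simp
  · exact Nat.lt_succ_of_le (List.length_dropWhile_le _ _)

-- max(run lengths, default=0)
def maxConsicativeWith1_alt (arr : List Int) : Int :=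
  match nzRuns arr with
  | [] => 0
  | x :: xs => xs.foldl max x

-- ===== PRECONDITION & SPEC =====
def Spec_maxConsicativeWith1 (arr : List Int) (out : Int) : Prop := out = maxConsicativeWith1_alt arr
instance (arr : List Int) (out : Int) : Decidable (Spec_maxConsicativeWith1 arr out) := by unfold Spec_maxConsicativeWith1; infer_instance

-- ===== CLAIM (what is proved, stated in full; the proofs are below) =====
def Claim_equal_maxConsicativeWith1 : Prop := ∀ (arr : List Int), Dom_maxConsicativeWith1 arr → Spec_maxConsicativeWith1 arr (maxConsicativeWith1 arr)

-- ===== LEMMAS AND PROOFS =====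

theorem nzRuns_nil : nzRuns [] = [] := by rw [nzRuns.eq_def]

theorem nzRuns_cons (x : Int) (xs : List Int) : nzRuns (x :: xs) =
    if x = 0 then nzRuns xs
    else (1 + (xs.takeWhile (fun y => y ≠ 0)).length : Int) ::
         nzRuns (xs.dropWhile (fun y => y ≠ 0)) := by
  rw [nzRuns.eq_def]

theorem maxIf (a b : Int) : (if a > b then a else b) = max b a := by
  rw [max_def]; split <;> split <;> omega

-- abstract "maximum count reachable from ongoing count c" of A's scan
def hCnt : List Int → Int → Int
  | [], _ => 0
  | x :: xs, c =>
    max (if x = 0 then 0 else c + 1) (hCnt xs (if x = 0 then 0 else c + 1))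

theorem hCnt_nonneg : ∀ (xs : List Int) (c : Int), 0 ≤ c → 0 ≤ hCnt xs c := by
  intro xs
  induction xs with
  | nil => intro c _; simp [hCnt]
  | cons x xs ih =>
    intro c hc
    simp only [hCnt]
    exact le_max_of_le_right (ih _ (by split <;> omega))

theorem foldA_eq_hCnt : ∀ (xs : List Int) (c m : Int), 0 ≤ c → 0 ≤ m →
    (xs.foldl (fun (s : Int × Int) i =>
      let count : Int := if i = 0 then 0 else s.1 + 1
      let mx : Int := if count > s.2 then count else s.2
      (count, mx)) (c, m)).2 = max m (hCnt xs c) := by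
  intro xs
  induction xs with
  | nil => intro c m _ hm; simp [hCnt]; omega
  | cons x xs ih =>
    intro c m hc hm
    rw [List.foldl_cons]
    show (xs.foldl _ (if x = 0 then (0:Int) else c + 1,
        if (if x = 0 then (0:Int) else c + 1) > m then (if x = 0 then (0:Int) else c + 1) else m)).2 = _
    rw [maxIf]
    rw [ih _ _ (by split <;> omega) (le_max_of_le_left hm)]
    simp only [hCnt, max_assoc]

theorem foldl_max_shift : ∀ (l : List Int) (a b : Int),
    l.foldl max (max a b) = max a (l.foldl max b) := by
  intro l
  induction l with
  | nil => intro a b; simp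
  | cons x l ih =>
    intro a b
    simp only [List.foldl_cons, max_assoc, ih]

theorem hCnt_run : ∀ (r : List Int), (∀ y ∈ r, y ≠ 0) → r ≠ [] →
    ∀ (xs : List Int) (c : Int),
    hCnt (r ++ xs) c = max (c + r.length) (hCnt xs (c + r.length)) := by
  intro r
  induction r with
  | nil => intro _ h; exact absurd rfl h
  | cons x r ih =>
    intro hnz _ xs c
    have hx : x ≠ 0 := hnz x (by simp)
    by_cases hr : r = []
    · subst hr
      simp [hCnt, hx]
    · have hrec := ih (fun y hy => hnz y (by simp [hy])) hr xs (c + 1)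
      rw [List.cons_append]
      simp only [hCnt, if_neg hx, hrec, List.length_cons]
      have hlen : (0:Int) ≤ r.length := Int.natCast_nonneg _
      have e2 : c + 1 + (r.length : Int) = c + ((r.length : Int) + 1) := by ring
      have e3 : ((r.length + 1 : ℕ) : Int) = (r.length : Int) + 1 := by push_cast; ring
      rw [e2, ← max_assoc,
          max_eq_right (show (c + 1 : Int) ≤ c + ((r.length : Int) + 1) by omega), e3]

theorem dropWhile_head_false (p : Int → Bool) : ∀ (l : List Int) (z : Int) (zs : List Int),
    l.dropWhile p = z :: zs → p z = false := by
  intro l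
  induction l with
  | nil => intro z zs h; simp [List.dropWhile] at h
  | cons a l ih =>
    intro z zs h
    rw [List.dropWhile_cons] at h
    split at h
    · exact ih z zs h
    · next hpa =>
      cases h
      simpa using hpa

theorem takeWhile_ne_zero : ∀ (xs : List Int), ∀ y ∈ xs.takeWhile (fun y => y ≠ 0), y ≠ 0 := by
  intro xs y hy
  have := List.mem_takeWhile_imp hy
  simpa using this

theorem hCnt_eq_runs : ∀ (n : ℕ) (xs : List Int), xs.length ≤ n →
    hCnt xs 0 = (nzRuns xs).foldl max 0 := by
  intro n
  induction n with
  | zero =>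
    intro xs hlen
    have : xs = [] := List.eq_nil_of_length_eq_zero (Nat.le_zero.mp hlen)
    subst this; simp [hCnt, nzRuns_nil]
  | succ n ih =>
    intro xs hlen
    match xs with
    | [] => simp [hCnt, nzRuns_nil]
    | x :: xs =>
      have hxslen : xs.length ≤ n := Nat.lt_succ_iff.mp (by simpa using hlen)
      by_cases hx : x = 0
      · subst hx
        rw [nzRuns_cons, if_pos rfl, ← ih xs hxslen]
        simp only [hCnt]
        exact max_eq_right (hCnt_nonneg xs 0 le_rfl)
      · set r := xs.takeWhile (fun y => y ≠ 0) with hr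
        set rest := xs.dropWhile (fun y => y ≠ 0) with hrest
        have hsplit : x :: xs = (x :: r) ++ rest := by
          simp [hr, hrest, List.takeWhile_append_dropWhile]
        have hnz : ∀ y ∈ x :: r, y ≠ 0 := by
          intro y hy
          rcases List.mem_cons.mp hy with h | h
          · exact h ▸ hx
          · exact takeWhile_ne_zero xs y h
        have hrun := hCnt_run (x :: r) hnz (by simp) rest 0
        have hrestlen : rest.length ≤ xs.length := List.length_dropWhile_le _ _
        have hlenr : (0:Int) ≤ r.length := Int.natCast_nonneg _
        rw [nzRuns_cons, if_neg hx, ← hr, ← hrest]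
        conv_lhs => rw [hsplit]
        rw [hrun]
        cases hrestcase : rest with
        | nil =>
          simp only [hCnt, nzRuns_nil, List.foldl_cons, List.foldl_nil, List.length_cons]
          push_cast
          rw [max_eq_left (by omega), max_eq_right (by omega)]
          ring
        | cons z zs =>
          have hz : z = 0 := by
            have := dropWhile_head_false (fun y => decide (y ≠ 0)) xs z zs
              (hrest.symm.trans hrestcase)
            simpa using this
          subst hz
          have hzslen : zs.length ≤ n := by
            have : rest.length ≤ n := le_trans hrestlen hxslen
            rw [hrestcase] at this; simpa using Nat.le_of_succ_le this
          have hstep : hCnt (0 :: zs) ((0:Int) + ((x :: r).length : Int)) = hCnt zs 0 := by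
            simp only [hCnt]
            exact max_eq_right (hCnt_nonneg zs 0 le_rfl)
          rw [hstep, nzRuns_cons, if_pos rfl, ih zs hzslen, List.foldl_cons]
          rw [max_comm (0:Int) (1 + (r.length : Int)), foldl_max_shift]
          congr 1
          simp only [List.length_cons]
          push_cast
          ring

theorem nzRuns_pos : ∀ (l : List Int) (y : Int) (ys : List Int), nzRuns l = y :: ys → 1 ≤ y := by
  intro l
  induction l with
  | nil => intro y ys h; rw [nzRuns_nil] at h; exact absurd h (by simp)
  | cons a l ihl =>
    intro y ys h
    rw [nzRuns_cons] at h
    split at h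
    · exact ihl y ys h
    · have hy : y = 1 + ((l.takeWhile (fun y => y ≠ 0)).length : Int) := by
        cases h; rfl
      have : (0:Int) ≤ ((l.takeWhile (fun y => y ≠ 0)).length : Int) := Int.natCast_nonneg _
      omega

theorem runs_foldl_eq_alt (arr : List Int) :
    (nzRuns arr).foldl max 0 = maxConsicativeWith1_alt arr := by
  unfold maxConsicativeWith1_alt
  cases h : nzRuns arr with
  | nil => simp
  | cons x xs =>
    have hx : 1 ≤ x := nzRuns_pos arr x xs h
    show List.foldl max 0 (x :: xs) = List.foldl max x xs
    rw [List.foldl_cons, max_comm (0:Int) x, foldl_max_shift]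
    conv_rhs => rw [show x = max x 0 from (max_eq_left (by omega)).symm]
    rw [foldl_max_shift]

-- ===== VERDICT (by name: the statement is the Claim_ definition above) =====
theorem maxConsicativeWith1_spec : Claim_equal_maxConsicativeWith1 := by
  intro arr _
  show maxConsicativeWith1 arr = maxConsicativeWith1_alt arr
  unfold maxConsicativeWith1
  rw [foldA_eq_hCnt arr 0 0 le_rfl le_rfl,
      hCnt_eq_runs arr.length arr le_rfl, runs_foldl_eq_alt]
  have h0 : (0:Int) ≤ (nzRuns arr).foldl max 0 := by
    rw [← hCnt_eq_runs arr.length arr le_rfl]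
    exact hCnt_nonneg arr 0 le_rfl
  rw [runs_foldl_eq_alt] at h0
  omega
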